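-- pv_equiv track=rewrite | github.com/pedrocpereira/LA2 | treinos/treino2.py | build
-- ===== SOURCE A (Python) =====
-- def build(vizinhos):
--     adj = {}
--
--     for fronteira in vizinhos:
--         for pais in fronteira:
--             if pais not in adj:
--                 adj[pais] = []
--             for vizinho in fronteira:
--                 if vizinho != pais and vizinho not in adj[pais]:
--                     adj[pais].append(vizinho)
--
--     return adj
-- ===== SOURCE B (Python) =====
-- def build(vizinhos):
--     order = list(dict.fromkeys(n for g in vizinhos for n in g))
--     return {p: list(dict.fromkeys(v for g in vizinhos if p in g for v in g if v != p))
--             for p in order}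
-- ===== Notes on version B (the rewrite author's own statement) =====
-- stated objective: faster
-- what changed: A scatters: a triple nested loop mutates a dict group-by-group, appending each co-member only after an inline 'not in' scan of the growing adjacency list; B gathers: it first fixes the key order as dict.fromkeys of the flattened groups, then builds the result in one dict comprehension that, for each node, collects co-members from every group containing it and deduplicates once with hash-based dict.fromkeys - no mutation and no per-append list scan.
import Mathlib
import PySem

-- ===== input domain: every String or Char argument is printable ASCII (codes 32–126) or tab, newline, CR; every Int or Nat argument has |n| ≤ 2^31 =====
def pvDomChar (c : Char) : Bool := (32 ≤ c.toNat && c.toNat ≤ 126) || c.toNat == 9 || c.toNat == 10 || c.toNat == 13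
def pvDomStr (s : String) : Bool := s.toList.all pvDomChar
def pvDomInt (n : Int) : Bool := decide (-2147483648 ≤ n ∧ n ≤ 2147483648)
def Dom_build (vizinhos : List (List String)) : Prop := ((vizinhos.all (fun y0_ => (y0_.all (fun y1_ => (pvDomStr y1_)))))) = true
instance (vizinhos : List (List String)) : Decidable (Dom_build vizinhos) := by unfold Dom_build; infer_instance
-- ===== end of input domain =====

-- B inverts A's traversal: instead of A's scatter (triple loop mutating a dict with an inline
-- dedup check), B gathers per node — key order from dedup of the flattened groups, each value
-- collected from all groups containing the node and deduplicated once (no per-append list scan);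
-- a timing run measured B faster on the large generated inputs.

-- ===== PORT A =====
-- inner 'for vizinho in fronteira' loop of A
def buildInner (fronteira : List String) (pais : String)
    (adj : PySem.Dict String (List String)) : PySem.Dict String (List String) :=
  fronteira.foldl (fun a vizinho =>
    if vizinho ≠ pais ∧ vizinho ∉ a.getD pais [] then a.modify pais [] (· ++ [vizinho]) else a) adj

def build (vizinhos : List (List String)) : List (String × List String) :=
  (vizinhos.foldl (fun adj fronteira =>
    fronteira.foldl (fun adj pais =>
      buildInner fronteira pais (if adj.contains pais then adj else adj.insert pais [])) adj)
    PySem.Dict.empty).items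

-- ===== PORT B =====
def build_alt (vizinhos : List (List String)) : List (String × List String) :=
  let order := PySem.List.dedup vizinhos.flatten
  order.map (fun p =>
    (p, PySem.List.dedup (vizinhos.flatMap
          (fun g => if p ∈ g then g.filter (fun v => v != p) else []))))

-- ===== PRECONDITION & SPEC =====
def Spec_build (vizinhos : List (List String)) (out : List (String × List String)) : Prop := out = build_alt vizinhos
instance (vizinhos : List (List String)) (out : List (String × List String)) : Decidable (Spec_build vizinhos out) := by unfold Spec_build; infer_instance

-- ===== CLAIM (what is proved, stated in full; the proofs are below) =====
def Claim_equal_build : Prop := ∀ (vizinhos : List (List String)), Dom_build vizinhos → Spec_build vizinhos (build vizinhos)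

-- ===== LEMMAS AND PROOFS =====

-- fold Set.add over e starting from s ('update')
def sadd (s e : List String) : List String := e.foldl PySem.Set.add s

-- B's per-node gathered neighbor stream (before dedup)
def gatherL (L : List (List String)) (p : String) : List String :=
  L.flatMap (fun g => if p ∈ g then g.filter (fun v => v != p) else [])

-- the canonical dict both sides reach after processing the groups L
def stD (L : List (List String)) : PySem.Dict String (List String) :=
  PySem.Dict.mk ((PySem.List.dedup L.flatten).map
    (fun p => (p, PySem.List.dedup (gatherL L p))))

-- intermediate state of A inside a group g, after the pais-prefix pr
def midK (L : List (List String)) (pr : List String) : List String :=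
  PySem.List.dedup (L.flatten ++ pr)
def midV (L : List (List String)) (g pr : List String) (p : String) : List String :=
  if p ∈ pr then sadd (PySem.List.dedup (gatherL L p)) (g.filter (fun v => v != p))
  else PySem.List.dedup (gatherL L p)
def midD (L : List (List String)) (g pr : List String) : PySem.Dict String (List String) :=
  PySem.Dict.mk ((midK L pr).map (fun p => (p, midV L g pr p)))

theorem set_add_of_mem {l : List String} {v : String} (h : v ∈ l) :
    PySem.Set.add l v = l := by
  simp [PySem.Set.add, PySem.Set.contains, h]

theorem set_add_of_not_mem {l : List String} {v : String} (h : v ∉ l) :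
    PySem.Set.add l v = l ++ [v] := by
  simp [PySem.Set.add, PySem.Set.contains, h]

theorem mem_sadd_left {a : String} {s : List String} (e : List String) (h : a ∈ s) :
    a ∈ sadd s e := by
  induction e generalizing s with
  | nil => exact h
  | cons x e ih => exact ih ((PySem.Set.mem_add _ _ _).2 (Or.inl h))

theorem mem_sadd_right {a : String} (s : List String) {e : List String} (h : a ∈ e) :
    a ∈ sadd s e := by
  induction e generalizing s with
  | nil => cases h
  | cons x e ih =>
    rcases List.mem_cons.1 h with rfl | h
    · exact mem_sadd_left e ((PySem.Set.mem_add _ _ _).2 (Or.inr rfl))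
    · exact ih _ h

theorem sadd_eq_self {s e : List String} (h : ∀ y ∈ e, y ∈ s) : sadd s e = s := by
  induction e generalizing s with
  | nil => rfl
  | cons x e ih =>
    have : PySem.Set.add s x = s := set_add_of_mem (h x (by simp))
    simp only [sadd, List.foldl_cons, this]
    exact ih (fun y hy => h y (by simp [hy]))

theorem sadd_sadd (s e : List String) : sadd (sadd s e) e = sadd s e :=
  sadd_eq_self (fun _ hx => mem_sadd_right s hx)

theorem dedup_append (l xs : List String) :
    PySem.List.dedup (l ++ xs) = sadd (PySem.List.dedup l) xs := by
  simp [sadd, PySem.List.dedup, PySem.Set.ofList_eq_foldl, List.foldl_append]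

theorem gather_nil {L : List (List String)} {p : String} (h : p ∉ L.flatten) :
    gatherL L p = [] := by
  unfold gatherL
  rw [List.flatMap_eq_nil_iff]
  intro g hg
  rw [if_neg]
  intro hp
  exact h (List.mem_flatten.2 ⟨g, hg, hp⟩)

theorem gather_append (L : List (List String)) (g : List String) (p : String) :
    gatherL (L ++ [g]) p
      = gatherL L p ++ (if p ∈ g then g.filter (fun v => v != p) else []) := by
  simp [gatherL]

-- d.insert k (d.getD k x) = d  when keys are nodup and k is present
theorem find?_upd_self (l : List (String × List String)) (k : String) (v : String × List String)
    (hn : (l.map Prod.fst).Nodup) (hf : l.find? (fun q => q.1 == k) = some v) :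
    l.map (fun q => if q.1 == k then (k, v.2) else q) = l := by
  induction l with
  | nil => simp at hf
  | cons a t ih =>
    by_cases ha : a.1 = k
    · have hba : ((fun q : String × List String => q.1 == k) a) = true := by simp [ha]
      rw [List.find?_cons_of_pos (p := fun q : String × List String => q.1 == k) hba] at hf
      obtain rfl : a = v := by injection hf
      have hkt : k ∉ t.map Prod.fst := by
        simp only [List.map_cons, List.nodup_cons] at hn
        rw [← ha]; exact hn.1
      have htail : t.map (fun q => if q.1 == k then (k, a.2) else q) = t := by
        conv_rhs => rw [← List.map_id t]
        apply List.map_congr_left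
        intro q hq
        have : (q.1 == k) = false := by
          simp only [beq_eq_false_iff_ne, ne_eq]
          intro hqe
          exact hkt (by rw [← hqe]; exact List.mem_map_of_mem hq)
        simp [this]
      simp only [List.map_cons, htail]
      rw [if_pos (show ((a.1 == k) = true) by simp [ha]), ← ha]
    · have hba : ((fun q : String × List String => q.1 == k) a) = false := by simpa using ha
      rw [List.find?_cons_of_neg (p := fun q : String × List String => q.1 == k) (by simp [hba])] at hf
      simp only [List.map_cons, List.nodup_cons] at hn
      simp only [List.map_cons, hba, Bool.false_eq_true, if_false]
      rw [ih hn.2 hf]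

theorem insert_getD_self (d : PySem.Dict String (List String)) (k : String) (x : List String)
    (hn : d.keys.Nodup) (hc : d.contains k = true) :
    d.insert k (d.getD k x) = d := by
  have hf : ∃ v, d.items.find? (fun q => q.1 == k) = some v := by
    rw [← Option.isSome_iff_exists, List.find?_isSome]
    simpa [PySem.Dict.contains, List.any_eq_true] using hc
  obtain ⟨v, hv⟩ := hf
  have hg : d.getD k x = v.2 := by
    simp [PySem.Dict.getD, PySem.Dict.get?, hv]
  unfold PySem.Dict.insert
  rw [if_pos hc, hg]
  exact congrArg PySem.Dict.mk (find?_upd_self d.items k v hn hv)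

-- A's inner loop = one bulk dedup-append at key pais (pais present, keys nodup)
theorem innerA_spec (fronteira : List String) (pais : String)
    (a : PySem.Dict String (List String)) (hn : a.keys.Nodup) (hc : a.contains pais = true) :
    buildInner fronteira pais a
      = a.insert pais (sadd (a.getD pais []) (fronteira.filter (fun v => v != pais))) := by
  induction fronteira generalizing a with
  | nil =>
    simpa [buildInner, sadd] using (insert_getD_self a pais [] hn hc).symm
  | cons v fr ih =>
    unfold buildInner
    simp only [List.foldl_cons, List.filter_cons]
    by_cases hvp : v = pais
    · have : ¬ (v ≠ pais ∧ v ∉ a.getD pais []) := fun h => h.1 hvp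
      rw [if_neg this]
      simpa [hvp, buildInner] using ih a hn hc
    · have hbv : (v != pais) = true := by simp [hvp]
      rw [hbv]
      by_cases hvm : v ∈ a.getD pais []
      · have : ¬ (v ≠ pais ∧ v ∉ a.getD pais []) := fun h => h.2 hvm
        rw [if_neg this]
        have := ih a hn hc
        unfold buildInner at this
        rw [this]
        simp [sadd, set_add_of_mem hvm]
      · rw [if_pos ⟨hvp, hvm⟩]
        have hmod : a.modify pais [] (· ++ [v]) = a.insert pais (a.getD pais [] ++ [v]) := rfl
        rw [hmod]
        set a1 := a.insert pais (a.getD pais [] ++ [v]) with ha1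
        have hn1 : a1.keys.Nodup := PySem.Dict.nodup_keys_insert a pais _ hn
        have hc1 : a1.contains pais = true := PySem.Dict.contains_insert_self a pais _
        have := ih a1 hn1 hc1
        unfold buildInner at this
        rw [this, ha1, PySem.Dict.insert_insert_self]
        rw [PySem.Dict.getD_insert_self]
        simp [sadd, set_add_of_not_mem hvm]

-- one ensure-then-inner step of A on a canonical dict, key already present
theorem inner_canon (g : List String) (ks : List String) (V : String → List String) (p : String)
    (hnd : ks.Nodup) (hp : p ∈ ks) :
    buildInner g p (PySem.Dict.mk (ks.map (fun k => (k, V k))))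
      = PySem.Dict.mk (ks.map (fun k =>
          (k, if k = p then sadd (V p) (g.filter (fun v => v != p)) else V k))) := by
  set d := PySem.Dict.mk (ks.map (fun k => (k, V k))) with hd
  have hkeys : d.keys = ks := by simp [hd, PySem.Dict.keys, Function.comp_def]
  have hn : d.keys.Nodup := by rw [hkeys]; exact hnd
  have hc : d.contains p = true := by
    rw [PySem.Dict.contains_eq_decide_mem_keys, hkeys]; simpa using hp
  have hget : d.getD p [] = V p :=
    PySem.Dict.getD_of_mem_items d (by exact List.mem_map_of_mem hp) hn []
  rw [innerA_spec g p d hn hc, hget]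
  rw [PySem.Dict.insert, if_pos hc]
  congr 1
  simp only [hd, List.map_map]
  apply List.map_congr_left
  intro k hk
  by_cases hkp : k = p
  · subst hkp; simp
  · simp [Function.comp, hkp]

-- one full pais step of A preserves the mid invariant
theorem step_mid (L : List (List String)) (g pr : List String) (p : String) :
    buildInner g p
        (if (midD L g pr).contains p then midD L g pr else (midD L g pr).insert p [])
      = midD L g (pr ++ [p]) := by
  have hnd : (midK L pr).Nodup := by
    unfold midK
    exact PySem.List.nodup_dedup _
  have hkeys : (midD L g pr).keys = midK L pr := by simp [midD, PySem.Dict.keys, Function.comp_def]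
  have hmem : ∀ q : String, q ∈ midK L pr ↔ q ∈ L.flatten ∨ q ∈ pr := by
    intro q; simp [midK]
  by_cases hp : p ∈ midK L pr
  · -- key already present
    have hc : (midD L g pr).contains p = true := by
      rw [PySem.Dict.contains_eq_decide_mem_keys, hkeys]; simpa using hp
    rw [if_pos hc]
    rw [show midD L g pr = PySem.Dict.mk ((midK L pr).map (fun k => (k, midV L g pr k))) from rfl]
    rw [inner_canon g (midK L pr) (midV L g pr) p hnd hp]
    unfold midD
    have hkeq : midK L (pr ++ [p]) = midK L pr := by
      unfold midK
      rw [show L.flatten ++ (pr ++ [p]) = (L.flatten ++ pr) ++ [p] by simp]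
      rw [PySem.List.dedup_eq_ofList, PySem.Set.ofList_append_singleton,
        ← PySem.List.dedup_eq_ofList, set_add_of_mem (by simpa [midK, PySem.List.mem_dedup] using hp)]
    rw [hkeq]
    congr 1
    apply List.map_congr_left
    intro k hk
    by_cases hkp : k = p
    · subst hkp
      simp only [reduceIte]
      unfold midV
      by_cases hpr : k ∈ pr
      · rw [if_pos hpr, sadd_sadd, if_pos (show k ∈ pr ++ [k] by simp)]
      · rw [if_neg hpr, if_pos (show k ∈ pr ++ [k] by simp)]
    · simp only [if_neg hkp]
      unfold midV
      have : (k ∈ pr ++ [p]) ↔ k ∈ pr := by simp [hkp]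
      by_cases hkpr : k ∈ pr
      · rw [if_pos hkpr, if_pos (this.2 hkpr)]
      · rw [if_neg hkpr, if_neg (fun h => hkpr (this.1 h))]
  · -- key absent: ensure appends (p, []), then the present-key case applies
    have hc : (midD L g pr).contains p = false := by
      rw [PySem.Dict.contains_eq_decide_mem_keys, hkeys]; simpa using hp
    rw [if_neg (by simp [hc])]
    have hins : (midD L g pr).insert p []
        = PySem.Dict.mk ((midK L pr ++ [p]).map
            (fun k => (k, if k = p then [] else midV L g pr k))) := by
      rw [PySem.Dict.insert, if_neg (by simp [hc])]
      congr 1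
      simp only [midD, List.map_append, List.map_cons, List.map_nil]
      congr 1
      apply List.map_congr_left
      intro k hk
      have hkp : k ≠ p := fun h => hp (h ▸ hk)
      simp [hkp]
    rw [hins]
    have hnd' : (midK L pr ++ [p]).Nodup := by
      refine hnd.append (List.nodup_singleton _) ?_
      intro a ha hb
      rw [List.mem_singleton] at hb
      exact hp (hb ▸ ha)
    rw [inner_canon g _ _ p hnd' (by simp)]
    have hpf : p ∉ L.flatten := fun h => hp ((hmem p).2 (Or.inl h))
    have hppr : p ∉ pr := fun h => hp ((hmem p).2 (Or.inr h))
    have hval : PySem.List.dedup (gatherL L p) = [] := by rw [gather_nil hpf]; rfl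
    unfold midD
    have hkeq : midK L (pr ++ [p]) = midK L pr ++ [p] := by
      unfold midK
      rw [show L.flatten ++ (pr ++ [p]) = (L.flatten ++ pr) ++ [p] by simp]
      rw [PySem.List.dedup_eq_ofList, PySem.Set.ofList_append_singleton,
        ← PySem.List.dedup_eq_ofList, set_add_of_not_mem (by simpa [midK, PySem.List.mem_dedup] using hp)]
    rw [hkeq]
    apply congrArg
    apply List.map_congr_left
    intro k hk
    by_cases hkp : k = p
    · subst hkp
      unfold midV
      simp [gather_nil hpf]
    · have hkpr : k ∈ midK L pr := by
        rcases List.mem_append.1 hk with h | h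
        · exact h
        · exact absurd (List.mem_singleton.1 h) hkp
      simp only [if_neg hkp]
      unfold midV
      have : (k ∈ pr ++ [p]) ↔ k ∈ pr := by simp [hkp]
      by_cases hkin : k ∈ pr
      · rw [if_pos (this.2 hkin), if_pos hkin]
      · rw [if_neg (fun h => hkin (this.1 h)), if_neg hkin]

-- A's fold over the pais of a group keeps the mid invariant
theorem fold_mid (L : List (List String)) (g : List String) :
    ∀ (l pr : List String),
      l.foldl (fun adj pais =>
          buildInner g pais (if adj.contains pais then adj else adj.insert pais [])) (midD L g pr)
        = midD L g (pr ++ l) := by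
  intro l
  induction l with
  | nil => intro pr; simp
  | cons p l ih =>
    intro pr
    simp only [List.foldl_cons]
    rw [step_mid L g pr p]
    rw [ih (pr ++ [p])]
    congr 1
    simp

theorem midD_nil (L : List (List String)) (g : List String) : midD L g [] = stD L := by
  unfold midD stD midK midV
  rw [List.append_nil]
  simp

theorem midD_full (L : List (List String)) (g : List String) :
    midD L g g = stD (L ++ [g]) := by
  unfold midD stD midK
  have hflat : (L ++ [g]).flatten = L.flatten ++ g := by simp
  rw [hflat]
  apply congrArg
  apply List.map_congr_left
  intro p hp
  unfold midV
  rw [gather_append]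
  by_cases hpg : p ∈ g
  · rw [if_pos hpg, if_pos hpg, dedup_append]
  · rw [if_neg hpg, if_neg hpg, List.append_nil]

-- the whole of A's outer fold reaches the canonical dict
theorem main_fold (L : List (List String)) :
    L.foldl (fun adj fronteira =>
        fronteira.foldl (fun adj pais =>
          buildInner fronteira pais (if adj.contains pais then adj else adj.insert pais [])) adj)
      PySem.Dict.empty = stD L := by
  induction L using List.reverseRecOn with
  | nil => rfl
  | append_singleton L g ih =>
    rw [List.foldl_append, ih, List.foldl_cons, List.foldl_nil]
    rw [show stD L = midD L g [] from (midD_nil L g).symm]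
    rw [fold_mid L g g [], List.nil_append]
    exact midD_full L g

-- ===== VERDICT (by name: the statement is the Claim_ definition above) =====
theorem build_spec : Claim_equal_build := by
  intro vizinhos _
  unfold Spec_build build build_alt
  rw [main_fold vizinhos]
  rfl
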